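-- pv_equiv track=rewrite | github.com/MrBrantCode/unitest_baseline | mut_generate/mist_train_cf/cf_56138/solution.py | prime_digit_sum
-- ===== SOURCE A (Python) =====
-- def prime_digit_sum(lst):
--     def is_prime(n):
--         if n < 2:
--             return False
--         for i in range(2, int(n**0.5)+1):
--             if n % i == 0:
--                 return False
--         return True
--
--     def sum_digits(n):
--         return sum(map(int, str(n)))
--
--     prime_list = [x for x in lst if is_prime(x)]
--     if not prime_list:
--         return 0
--     largest_prime = max(prime_list)
--     return sum_digits(largest_prime)
-- ===== SOURCE B (Python) =====
-- def prime_digit_sum(lst):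
--     def is_prime(n):
--         if n < 2:
--             return False
--         for i in range(2, int(n**0.5)+1):
--             if n % i == 0:
--                 return False
--         return True
--
--     def sum_digits(n):
--         return sum(map(int, str(n)))
--
--     for x in sorted(lst, reverse=True):
--         if is_prime(x):
--             return sum_digits(x)
--     return 0
-- ===== Notes on version B (the rewrite author's own statement) =====
-- stated objective: faster
-- what changed: Replaces filter-all-primes-then-max with a descending sort followed by an early-exit scan: primality is tested only until the first (= largest) prime is found instead of on every element.
import Mathlib
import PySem

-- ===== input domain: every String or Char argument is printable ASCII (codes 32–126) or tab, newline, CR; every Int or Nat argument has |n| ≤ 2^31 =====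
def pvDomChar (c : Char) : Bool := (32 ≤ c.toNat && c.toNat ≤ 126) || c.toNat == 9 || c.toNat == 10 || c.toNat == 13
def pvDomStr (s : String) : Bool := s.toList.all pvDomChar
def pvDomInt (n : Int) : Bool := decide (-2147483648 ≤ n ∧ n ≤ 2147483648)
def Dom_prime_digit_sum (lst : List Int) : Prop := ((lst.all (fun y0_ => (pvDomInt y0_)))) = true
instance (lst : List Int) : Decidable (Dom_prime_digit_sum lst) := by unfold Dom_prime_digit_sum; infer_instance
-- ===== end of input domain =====

-- B replaces A's filter-all-then-max with a descending sort and an early-exit scan for the first prime (alternative decomposition, same return value).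


-- ===== PORT A =====
-- is_prime: trial division up to int(n**0.5); int(n**0.5) = Nat.sqrt exactly for 0 ≤ n ≤ 2^31 (checked against CPython)
def pvIsPrime (n : Int) : Bool :=
  if n < 2 then false
  else !((PySem.List.pyRange 2 (((Nat.sqrt n.toNat : Nat) : Int) + 1) 1).any
           (fun i => PySem.Int.mod n i == 0))

-- sum(map(int, str(n))): exact for n ≥ 0 (every char of str(n) is then a digit, int(c) = code - 48);
-- only ever called on a prime, so n ≥ 2 and the '-' case Python would raise on is unreachable
def pvSumDigits (n : Int) : Int :=
  ((PySem.Int.toChars n).map (fun c => ((c.toNat : Int) - 48))).sum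

def prime_digit_sum (lst : List Int) : Int :=
  let prime_list := lst.filter (fun x => pvIsPrime x)
  if prime_list.isEmpty then 0
  else
    match PySem.List.max? prime_list (fun x => x) with
    | some largest_prime => pvSumDigits largest_prime
    | none => 0  -- unreachable: prime_list nonempty

-- ===== PORT B =====
def prime_digit_sum_alt (lst : List Int) : Int :=
  match (PySem.List.sorted lst (fun x => x) true).find? (fun x => pvIsPrime x) with
  | some x => pvSumDigits x
  | none => 0

-- ===== PRECONDITION & SPEC =====
def Spec_prime_digit_sum (lst : List Int) (out : Int) : Prop := out = prime_digit_sum_alt lst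
instance (lst : List Int) (out : Int) : Decidable (Spec_prime_digit_sum lst out) := by unfold Spec_prime_digit_sum; infer_instance

-- ===== CLAIM (what is proved, stated in full; the proofs are below) =====
def Claim_equal_prime_digit_sum : Prop := ∀ (lst : List Int), Dom_prime_digit_sum lst → Spec_prime_digit_sum lst (prime_digit_sum lst)

-- ===== LEMMAS AND PROOFS =====

-- in a descending list, the first element satisfying p bounds every element satisfying p
theorem pv_find?_desc_max {p : Int → Bool} {s : List Int} {m : Int}
    (hs : s.Pairwise (fun a b => b ≤ a)) (h : s.find? p = some m) :
    ∀ y ∈ s, p y = true → y ≤ m := by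
  induction s with
  | nil => simp at h
  | cons a t ih =>
    rw [List.pairwise_cons] at hs
    by_cases hpa : p a = true
    · have hma : m = a := by simp [hpa] at h; omega
      subst hma
      intro y hy _
      rcases List.mem_cons.mp hy with rfl | hyt
      · exact le_refl _
      · exact hs.1 y hyt
    · rw [List.find?_cons_of_neg (by simpa using hpa)] at h
      intro y hy hpy
      rcases List.mem_cons.mp hy with rfl | hyt
      · exact absurd hpy hpa
      · exact ih hs.2 h y hyt hpy

theorem prime_digit_sum_eq (lst : List Int) :
    prime_digit_sum lst = prime_digit_sum_alt lst := by
  unfold prime_digit_sum prime_digit_sum_alt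
  set p : Int → Bool := fun x => pvIsPrime x with hp
  set s := PySem.List.sorted lst (fun x => x) true with hsdef
  have hmem_s : ∀ x, x ∈ s ↔ x ∈ lst := fun x => PySem.List.mem_sorted lst (fun x => x) true x
  cases hfind : s.find? p with
  | none =>
    have hnone : ∀ x ∈ s, ¬ p x = true := by
      intro x hx
      exact List.find?_eq_none.mp hfind x hx
    have hfilt : lst.filter p = [] := by
      rw [List.filter_eq_nil_iff]
      intro x hx
      exact hnone x ((hmem_s x).mpr hx)
    simp [hfilt]
  | some m' =>
    have hpm' : p m' = true := List.find?_some hfind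
    have hm's : m' ∈ s := List.mem_of_find?_eq_some hfind
    have hm'F : m' ∈ lst.filter p :=
      List.mem_filter.mpr ⟨(hmem_s m').mp hm's, hpm'⟩
    have hne : (lst.filter p).isEmpty = false := by
      cases hF : lst.filter p with
      | nil => rw [hF] at hm'F; simp at hm'F
      | cons a t => simp
    rw [if_neg (by simp [hne])]
    cases hmax : PySem.List.max? (lst.filter p) (fun x => x) with
    | none =>
      exact absurd ((PySem.List.max?_eq_none_iff (lst.filter p) (fun x => x)).mp hmax)
        (by intro hF; rw [hF] at hm'F; simp at hm'F)
    | some m =>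
      have hmF : m ∈ lst.filter p := PySem.List.max?_mem hmax
      have hm_lst : m ∈ lst := (List.mem_filter.mp hmF).1
      have hpm : p m = true := (List.mem_filter.mp hmF).2
      -- m' ≤ m : m is a maximum of the filtered list
      have h1 : m' ≤ m := PySem.List.max?_isMax hmax m' hm'F
      -- m ≤ m' : first prime of the descending sort bounds every prime
      have hdesc : s.Pairwise (fun a b => b ≤ a) := by
        have := PySem.List.sorted_pairwise_rev (xs := lst) (key := fun x => x)
        simpa [hsdef] using this
      have h2 : m ≤ m' :=
        pv_find?_desc_max hdesc hfind m ((hmem_s m).mpr hm_lst) hpm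
      rw [le_antisymm h1 h2]

-- ===== VERDICT (by name: the statement is the Claim_ definition above) =====
theorem prime_digit_sum_spec : Claim_equal_prime_digit_sum := by
  intro lst _
  unfold Spec_prime_digit_sum
  exact prime_digit_sum_eq lst
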